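-- pv_equiv track=rewrite | github.com/MarryAngel/Competitive_Programming | Beecrowd/python/1215.py | montar_dicionario
-- ===== SOURCE A (Python) =====
-- def verificar_letra(caracter):
--     if ('a' <= caracter <= 'z') or ('A' <= caracter <= 'Z'):
--         return True
--     return False
--
-- def montar_dicionario(dic_andy: set, texto: str) -> set:
--
--     novo_texto = ""
--
--     for pos, caracter in enumerate(texto):
--         if verificar_letra(caracter):
--             novo_texto += caracter.lower()
--         else:
--             novo_texto += " "
--
--     palavras = novo_texto.split()
--
--     for palavra in palavras:
--         if palavra.isalpha():
--             dic_andy.add(palavra)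
--
--     return dic_andy
-- ===== SOURCE B (Python) =====
-- def montar_dicionario(dic_andy: set, texto: str) -> set:
--     # single pass: collect maximal ASCII-letter runs, lowercase each, add to the set
--     cur = []
--     for ch in texto:
--         if ('a' <= ch <= 'z') or ('A' <= ch <= 'Z'):
--             cur.append(ch)
--         elif cur:
--             dic_andy.add(''.join(cur).lower())
--             cur = []
--     if cur:
--         dic_andy.add(''.join(cur).lower())
--     return dic_andy
-- ===== Notes on version B (the rewrite author's own statement) =====
-- stated objective: simpler
-- what changed: Replaces the normalize-then-split pipeline (build a lowered/space-masked copy of the text, split it, filter with isalpha) by a single pass that collects maximal ASCII-letter runs and adds each lowercased run to the set directly, with no intermediate string, no split and no isalpha check.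
import Mathlib
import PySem

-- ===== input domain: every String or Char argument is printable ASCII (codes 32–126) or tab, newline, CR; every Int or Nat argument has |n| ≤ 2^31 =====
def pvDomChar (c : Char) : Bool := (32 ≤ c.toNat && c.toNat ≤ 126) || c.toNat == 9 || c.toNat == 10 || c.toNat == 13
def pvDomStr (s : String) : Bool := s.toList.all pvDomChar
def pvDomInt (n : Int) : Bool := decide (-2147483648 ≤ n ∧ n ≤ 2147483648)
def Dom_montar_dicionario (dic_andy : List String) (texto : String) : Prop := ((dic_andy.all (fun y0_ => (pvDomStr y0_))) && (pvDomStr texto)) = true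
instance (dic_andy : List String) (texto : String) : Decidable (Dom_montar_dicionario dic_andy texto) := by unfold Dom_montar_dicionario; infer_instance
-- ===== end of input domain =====

-- B replaces A's normalize-then-split pipeline by a single pass over the text collecting
-- maximal ASCII-letter runs (objective: simpler). Both A and B mutate the set argument in
-- place in Python; the equivalence proved here is about the returned value.

-- ===== PORT A =====
def verificar_letra (caracter : Char) : Bool :=
  if (('a' ≤ caracter && caracter ≤ 'z') || ('A' ≤ caracter && caracter ≤ 'Z')) then true
  else false

def montar_dicionario (dic_andy : List String) (texto : String) : List String :=
  let novo_texto : List Char :=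
    texto.toList.foldl (fun acc caracter =>
      acc ++ [if verificar_letra caracter then PySem.Chars.lowerChar caracter else ' ']) []
  let palavras := PySem.Chars.split₀ novo_texto
  palavras.foldl (fun d palavra =>
    if PySem.Chars.strIsalpha palavra then PySem.Set.add d (String.ofList palavra) else d) dic_andy

-- ===== PORT B =====
def montar_dicionario_alt (dic_andy : List String) (texto : String) : List String :=
  let s := texto.toList.foldl (fun (s : List String × List Char) ch =>
      if (('a' ≤ ch && ch ≤ 'z') || ('A' ≤ ch && ch ≤ 'Z')) then (s.1, s.2 ++ [ch])
      else if !s.2.isEmpty then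
        (PySem.Set.add s.1 (String.ofList (PySem.Chars.lower s.2)), [])
      else (s.1, [])) (dic_andy, [])
  if !s.2.isEmpty then PySem.Set.add s.1 (String.ofList (PySem.Chars.lower s.2)) else s.1

-- ===== PRECONDITION & SPEC =====
def Spec_montar_dicionario (dic_andy : List String) (texto : String) (out : List String) : Prop := out = montar_dicionario_alt dic_andy texto
instance (dic_andy : List String) (texto : String) (out : List String) : Decidable (Spec_montar_dicionario dic_andy texto out) := by unfold Spec_montar_dicionario; infer_instance

-- ===== CLAIM (what is proved, stated in full; the proofs are below) =====
def Claim_equal_montar_dicionario : Prop := ∀ (dic_andy : List String) (texto : String), Dom_montar_dicionario dic_andy texto → Spec_montar_dicionario dic_andy texto (montar_dicionario dic_andy texto)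

-- ===== LEMMAS AND PROOFS =====

-- proof-side view of B's scan: the list of maximal letter runs of cs, with cur the open run
def pvRuns : List Char → List Char → List (List Char)
  | [], cur => if cur.isEmpty then [] else [cur]
  | c :: rest, cur =>
    if PySem.Chars.isalpha c then pvRuns rest (cur ++ [c])
    else if cur.isEmpty then pvRuns rest [] else cur :: pvRuns rest []

-- A's per-character test is Python's ASCII isalpha
theorem verificar_eq_isalpha (c : Char) :
    verificar_letra c = PySem.Chars.isalpha c := by
  simp [verificar_letra, PySem.Chars.isalpha, PySem.Chars.isupper, PySem.Chars.islower,
    Bool.or_comm]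

theorem toNat_ofNat_of_lt {n : Nat} (h : n < 55296) : (Char.ofNat n).toNat = n := by
  unfold Char.ofNat
  split
  · rfl
  · rename_i hv; exact absurd (Or.inl h) hv

theorem pv_char_le (c d : Char) : (c ≤ d) ↔ (c.toNat ≤ d.toNat) := Iff.rfl

theorem alpha_toNat {c : Char} (h : PySem.Chars.isalpha c = true) :
    (97 ≤ c.toNat ∧ c.toNat ≤ 122) ∨ (65 ≤ c.toNat ∧ c.toNat ≤ 90) := by
  simp only [PySem.Chars.isalpha, PySem.Chars.isupper, PySem.Chars.islower, Bool.or_eq_true,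
    Bool.and_eq_true, decide_eq_true_eq, pv_char_le,
    show ('a' : Char).toNat = 97 from rfl, show ('z' : Char).toNat = 122 from rfl,
    show ('A' : Char).toNat = 65 from rfl, show ('Z' : Char).toNat = 90 from rfl] at h
  omega

theorem lowerChar_toNat_of_alpha {c : Char} (h : PySem.Chars.isalpha c = true) :
    97 ≤ (PySem.Chars.lowerChar c).toNat ∧ (PySem.Chars.lowerChar c).toNat ≤ 122 := by
  have hd := alpha_toNat h
  simp only [PySem.Chars.lowerChar, PySem.Chars.isupper, Bool.and_eq_true, decide_eq_true_eq,
    pv_char_le, show ('A' : Char).toNat = 65 from rfl, show ('Z' : Char).toNat = 90 from rfl]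
  split_ifs with h1
  · rw [toNat_ofNat_of_lt (by omega)]
    omega
  · rw [not_and_or, not_le, not_le] at h1
    omega

theorem isspace_lowerChar_of_alpha {c : Char} (h : PySem.Chars.isalpha c = true) :
    PySem.Chars.isspace (PySem.Chars.lowerChar c) = false := by
  obtain ⟨h1, h2⟩ := lowerChar_toNat_of_alpha h
  simp only [PySem.Chars.isspace, Bool.or_eq_false_iff, Bool.and_eq_false_iff,
    decide_eq_false_iff_not]
  omega

theorem isalpha_lowerChar_of_alpha {c : Char} (h : PySem.Chars.isalpha c = true) :
    PySem.Chars.isalpha (PySem.Chars.lowerChar c) = true := by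
  obtain ⟨h1, h2⟩ := lowerChar_toNat_of_alpha h
  simp only [PySem.Chars.isalpha, PySem.Chars.isupper, PySem.Chars.islower, Bool.or_eq_true,
    Bool.and_eq_true, decide_eq_true_eq, pv_char_le,
    show ('a' : Char).toNat = 97 from rfl, show ('z' : Char).toNat = 122 from rfl,
    show ('A' : Char).toNat = 65 from rfl, show ('Z' : Char).toNat = 90 from rfl]
  right; omega

theorem isspace_space : PySem.Chars.isspace ' ' = true := by decide

-- splitting A's normalized text gives exactly the lowered letter runs
theorem go_eq_runs (cs : List Char) : ∀ (cur : List Char) (acc : List (List Char)),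
    PySem.Chars.split₀.go
      (cs.map (fun c => if PySem.Chars.isalpha c then PySem.Chars.lowerChar c else ' '))
      ((cur.map PySem.Chars.lowerChar).reverse) acc
    = acc.reverse ++ (pvRuns cs cur).map PySem.Chars.lower := by
  induction cs with
  | nil =>
    intro cur acc
    cases cur with
    | nil => simp [PySem.Chars.split₀.go, pvRuns]
    | cons a t =>
      simp [PySem.Chars.split₀.go, pvRuns, PySem.Chars.lower]
  | cons c rest ih =>
    intro cur acc
    by_cases hc : PySem.Chars.isalpha c = true
    · have hsp := isspace_lowerChar_of_alpha hc
      simp only [List.map_cons, hc, if_pos, PySem.Chars.split₀.go, hsp, Bool.false_eq_true,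
        if_false, pvRuns]
      have : PySem.Chars.lowerChar c :: (cur.map PySem.Chars.lowerChar).reverse
          = (((cur ++ [c]).map PySem.Chars.lowerChar).reverse) := by simp
      rw [this, ih]
    · simp only [Bool.not_eq_true] at hc
      simp only [List.map_cons, hc, Bool.false_eq_true, if_false, PySem.Chars.split₀.go,
        isspace_space, if_true, pvRuns]
      cases cur with
      | nil => simpa using ih [] acc
      | cons a t =>
        simp only [List.isEmpty_cons, List.map_cons, List.reverse_cons]
        rw [if_neg (by simp)]
        have h2 := ih []
          ((((List.map PySem.Chars.lowerChar t).reverse ++ [PySem.Chars.lowerChar a]).reverse) :: acc)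
        simp only [List.map_nil, List.reverse_nil] at h2
        rw [h2]
        simp [PySem.Chars.lower]

-- every run is a nonempty all-letter word
theorem runs_mem (cs : List Char) : ∀ (cur w : List Char),
    cur.all PySem.Chars.isalpha = true → w ∈ pvRuns cs cur →
    w ≠ [] ∧ w.all PySem.Chars.isalpha = true := by
  induction cs with
  | nil =>
    intro cur w hcur hw
    cases cur with
    | nil => simp [pvRuns] at hw
    | cons a t =>
      simp [pvRuns] at hw
      subst hw
      exact ⟨by simp, hcur⟩
  | cons c rest ih =>
    intro cur w hcur hw
    by_cases hc : PySem.Chars.isalpha c = true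
    · simp only [pvRuns, hc, if_true] at hw
      exact ih (cur ++ [c]) w (by simp_all) hw
    · simp only [Bool.not_eq_true] at hc
      simp only [pvRuns, hc, Bool.false_eq_true, if_false] at hw
      cases cur with
      | nil => exact ih [] w rfl (by simpa using hw)
      | cons a t =>
        simp only [List.isEmpty_cons, Bool.false_eq_true, if_false, List.mem_cons] at hw
        rcases hw with rfl | hw
        · exact ⟨by simp, hcur⟩
        · exact ih [] w rfl hw

-- A's final fold over the lowered runs drops its isalpha guard
theorem foldA_eq_foldB (rs : List (List Char)) :
    ∀ (d : List String), (∀ r ∈ rs, r ≠ [] ∧ r.all PySem.Chars.isalpha = true) →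
    (rs.map PySem.Chars.lower).foldl (fun d palavra =>
        if PySem.Chars.strIsalpha palavra then PySem.Set.add d (String.ofList palavra) else d) d
    = rs.foldl (fun d w => PySem.Set.add d (String.ofList (PySem.Chars.lower w))) d := by
  induction rs with
  | nil => intro d _; rfl
  | cons r rest ih =>
    intro d hmem
    obtain ⟨hne, hall⟩ := hmem r (by simp)
    have halpha : PySem.Chars.strIsalpha (PySem.Chars.lower r) = true := by
      simp only [PySem.Chars.strIsalpha, PySem.Chars.lower, Bool.and_eq_true, List.all_map]
      constructor
      · simp [hne]
      · simp only [List.all_eq_true] at hall ⊢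
        intro c hc
        exact isalpha_lowerChar_of_alpha (hall c hc)
    simp only [List.map_cons, List.foldl_cons, halpha, if_true]
    exact ih _ (fun r hr => hmem r (by simp [hr]))

-- B's interleaved scan equals the fold over the runs
theorem scanB_eq_runs (cs : List Char) : ∀ (d : List String) (cur : List Char),
    (let s := cs.foldl (fun (s : List String × List Char) ch =>
        if (('a' ≤ ch && ch ≤ 'z') || ('A' ≤ ch && ch ≤ 'Z')) then (s.1, s.2 ++ [ch])
        else if !s.2.isEmpty then
          (PySem.Set.add s.1 (String.ofList (PySem.Chars.lower s.2)), [])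
        else (s.1, [])) (d, cur)
     if !s.2.isEmpty then PySem.Set.add s.1 (String.ofList (PySem.Chars.lower s.2)) else s.1)
    = (pvRuns cs cur).foldl (fun d w => PySem.Set.add d (String.ofList (PySem.Chars.lower w))) d := by
  induction cs with
  | nil =>
    intro d cur
    cases cur with
    | nil => simp [pvRuns]
    | cons a t => simp [pvRuns]
  | cons c rest ih =>
    intro d cur
    have hcond : (('a' ≤ c && c ≤ 'z') || ('A' ≤ c && c ≤ 'Z')) = PySem.Chars.isalpha c := by
      simp [PySem.Chars.isalpha, PySem.Chars.isupper, PySem.Chars.islower, Bool.or_comm]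
    by_cases hc : PySem.Chars.isalpha c = true
    · simp only [List.foldl_cons, hcond, hc, if_true, pvRuns]
      exact ih d (cur ++ [c])
    · simp only [Bool.not_eq_true] at hc
      simp only [List.foldl_cons, hcond, hc, Bool.false_eq_true, if_false, pvRuns]
      cases cur with
      | nil => simpa using ih d []
      | cons a t =>
        simp only [List.isEmpty_cons, Bool.not_false, if_true]
        exact ih _ []

-- ===== VERDICT (by name: the statement is the Claim_ definition above) =====
theorem montar_dicionario_spec : Claim_equal_montar_dicionario := by
  intro dic_andy texto _
  unfold Spec_montar_dicionario montar_dicionario montar_dicionario_alt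
  have hnovo : texto.toList.foldl (fun acc caracter =>
      acc ++ [if verificar_letra caracter then PySem.Chars.lowerChar caracter else ' ']) []
      = texto.toList.map
        (fun c => if PySem.Chars.isalpha c then PySem.Chars.lowerChar c else ' ') := by
    rw [PySem.List.foldl_append_singleton_eq_map]
    exact List.map_congr_left (fun c _ => by rw [verificar_eq_isalpha])
  simp only [hnovo, PySem.Chars.split₀]
  have hgo := go_eq_runs texto.toList [] []
  simp only [List.map_nil, List.reverse_nil] at hgo
  rw [hgo]
  simp only [List.nil_append]
  rw [foldA_eq_foldB _ dic_andy (fun r hr => runs_mem texto.toList [] r rfl hr)]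
  exact (scanB_eq_runs texto.toList dic_andy []).symm
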